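-- pv_equiv track=rewrite | github.com/ankaggarwal94/qanta-buzzer | qb_data/data_loader.py | _parse_clues_to_tokens
-- ===== SOURCE A (Python) =====
-- from typing import List, Optional, Tuple, Any, Dict
--
-- def _parse_clues_to_tokens(clues: List[str]) -> Tuple[List[str], List[int]]:
--     """
--     Convert list of clues to tokens and run indices.
--
--     Parameters
--     ----------
--     clues : List[str]
--         List of clue strings
--
--     Returns
--     -------
--     Tuple[List[str], List[int]]
--         Tokens (words) and indices where each clue ends
--     """
--     tokens = []
--     run_indices = []
--
--     for clue in clues:
--         clue_tokens = clue.split()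
--         tokens.extend(clue_tokens)
--         if clue_tokens:  # Only add index if clue has tokens
--             run_indices.append(len(tokens) - 1)
--
--     return tokens, run_indices
-- ===== SOURCE B (Python) =====
-- from typing import List, Tuple
--
-- def _parse_clues_to_tokens(clues: List[str]) -> Tuple[List[str], List[int]]:
--     # Character-level whitespace scanner: words are emitted directly into the
--     # global token list as they are completed; no str.split, no per-clue lists.
--     tokens = []
--     run_indices = []
--     for clue in clues:
--         before = len(tokens)
--         word = []
--         for ch in clue:
--             if ch.isspace():
--                 if word:
--                     tokens.append("".join(word))
--                     word = []
--             else: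
--                 word.append(ch)
--         if word:
--             tokens.append("".join(word))
--         if len(tokens) > before:
--             run_indices.append(len(tokens) - 1)
--     return tokens, run_indices
-- ===== Notes on version B (the rewrite author's own statement) =====
-- stated objective: alternative
-- what changed: B replaces str.split with a hand-rolled character-level whitespace scanner that emits completed words directly into the global token list and detects a non-empty clue by comparing token counts, instead of A's per-clue split()-list extend-and-record loop.
import Mathlib
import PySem

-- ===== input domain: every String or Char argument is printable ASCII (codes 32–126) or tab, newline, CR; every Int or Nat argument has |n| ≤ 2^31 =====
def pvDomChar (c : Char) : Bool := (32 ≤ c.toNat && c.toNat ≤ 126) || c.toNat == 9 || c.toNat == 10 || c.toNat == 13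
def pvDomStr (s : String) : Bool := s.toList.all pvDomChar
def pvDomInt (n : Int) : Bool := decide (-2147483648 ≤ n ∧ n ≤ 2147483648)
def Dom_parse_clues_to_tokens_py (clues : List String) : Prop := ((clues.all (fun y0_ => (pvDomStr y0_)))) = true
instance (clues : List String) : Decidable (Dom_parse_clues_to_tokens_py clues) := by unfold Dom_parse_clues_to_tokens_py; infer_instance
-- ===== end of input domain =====

-- B replaces str.split with a hand-rolled character-level whitespace scanner that emits
-- words directly into the global token list (alternative algorithm; same cost).

-- ===== PORT A =====
-- one iteration of A's loop: split the clue, extend tokens, record index if non-empty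
def pvAStep (st : List String × List Int) (clue : String) : List String × List Int :=
  let clue_tokens := PySem.Str.split₀ clue
  let tokens := st.1 ++ clue_tokens
  if clue_tokens ≠ [] then (tokens, st.2 ++ [(tokens.length : Int) - 1]) else (tokens, st.2)

def parse_clues_to_tokens_py (clues : List String) : List String × List Int :=
  clues.foldl pvAStep ([], [])

-- ===== PORT B =====
-- B's inner character loop: scan a clue's chars, appending each completed word to `toks`;
-- after the loop flush the pending word (the trailing `if word:` in Source B)
def pvScanClue : List Char → List Char → List String → List String
  | [], word, toks => if word.isEmpty then toks else toks ++ [String.ofList word]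
  | c :: rest, word, toks =>
    if PySem.Chars.isspace c then
      if word.isEmpty then pvScanClue rest [] toks
      else pvScanClue rest [] (toks ++ [String.ofList word])
    else pvScanClue rest (word ++ [c]) toks

-- one iteration of B's outer loop
def pvBStep (st : List String × List Int) (clue : String) : List String × List Int :=
  let before := st.1.length
  let tokens := pvScanClue clue.toList [] st.1
  if before < tokens.length then (tokens, st.2 ++ [(tokens.length : Int) - 1]) else (tokens, st.2)

def parse_clues_to_tokens_py_alt (clues : List String) : List String × List Int :=
  clues.foldl pvBStep ([], [])

-- ===== PRECONDITION & SPEC =====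
def Spec_parse_clues_to_tokens_py (clues : List String) (out : List String × List Int) : Prop := out = parse_clues_to_tokens_py_alt clues
instance (clues : List String) (out : List String × List Int) : Decidable (Spec_parse_clues_to_tokens_py clues out) := by unfold Spec_parse_clues_to_tokens_py; infer_instance

-- ===== CLAIM (what is proved, stated in full; the proofs are below) =====
def Claim_equal_parse_clues_to_tokens_py : Prop := ∀ (clues : List String), Dom_parse_clues_to_tokens_py clues → Spec_parse_clues_to_tokens_py clues (parse_clues_to_tokens_py clues)

-- ===== LEMMAS AND PROOFS =====
-- split₀.go's accumulator distributes out
theorem pv_go_acc (cs : List Char) (cur : List Char) (acc : List (List Char)) :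
    PySem.Chars.split₀.go cs cur acc = acc.reverse ++ PySem.Chars.split₀.go cs cur [] := by
  induction cs generalizing cur acc with
  | nil =>
    simp only [PySem.Chars.split₀.go]
    by_cases h : cur.isEmpty <;> simp [h]
  | cons c rest ih =>
    simp only [PySem.Chars.split₀.go]
    by_cases hs : PySem.Chars.isspace c
    · by_cases h : cur.isEmpty
      · simp only [hs, h, if_true]
        exact ih [] acc
      · simp only [hs, h, if_true, if_false, Bool.false_eq_true]
        rw [ih _ (cur.reverse :: acc), ih _ [cur.reverse]]
        simp
    · simp only [hs, Bool.false_eq_true, if_false]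
      exact ih _ _

-- B's scanner computes exactly toks ++ split of the remaining chars (word pending)
theorem pv_scan_eq (cs : List Char) (word : List Char) (toks : List String) :
    pvScanClue cs word toks =
      toks ++ (PySem.Chars.split₀.go cs word.reverse []).map String.ofList := by
  induction cs generalizing word toks with
  | nil =>
    simp only [pvScanClue, PySem.Chars.split₀.go]
    by_cases h : word.isEmpty
    · simp [List.isEmpty_iff.mp h]
    · have h' : word.reverse.isEmpty = false := by
        simp only [List.isEmpty_iff] at *; simpa using h
      simp [h, h']
  | cons c rest ih =>
    simp only [pvScanClue, PySem.Chars.split₀.go]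
    by_cases hs : PySem.Chars.isspace c
    · by_cases h : word.isEmpty
      · have h' : word.reverse.isEmpty = true := by
          simp only [List.isEmpty_iff] at *; simpa using h
        simp only [hs, h, h', if_true]
        simpa using ih [] toks
      · have h' : word.reverse.isEmpty = false := by
          simp only [List.isEmpty_iff] at *; simpa using h
        simp only [hs, h, h', if_true, if_false, Bool.false_eq_true]
        rw [ih [] (toks ++ [String.ofList word]), pv_go_acc rest [] [word.reverse.reverse]]
        simp
    · simp only [hs, Bool.false_eq_true, if_false]
      rw [ih (word ++ [c]) toks]
      simp

-- hence the two loop bodies agree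
theorem pv_step_eq (st : List String × List Int) (clue : String) :
    pvBStep st clue = pvAStep st clue := by
  unfold pvBStep pvAStep
  rw [pv_scan_eq]
  simp only [List.reverse_nil]
  have hsplit : (PySem.Chars.split₀.go clue.toList [] []).map String.ofList
      = PySem.Str.split₀ clue := by
    simp [PySem.Str.split₀, PySem.Chars.split₀]
  rw [hsplit]
  by_cases h : PySem.Str.split₀ clue = []
  · simp [h]
  · have hlen : 0 < (PySem.Str.split₀ clue).length := List.length_pos_iff.mpr h
    simp only [h, ne_eq, not_false_iff, if_true, List.length_append]
    rw [if_pos (by omega)]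

-- ===== VERDICT (by name: the statement is the Claim_ definition above) =====
theorem parse_clues_to_tokens_py_spec : Claim_equal_parse_clues_to_tokens_py := by
  intro clues _
  unfold Spec_parse_clues_to_tokens_py parse_clues_to_tokens_py parse_clues_to_tokens_py_alt
  have : pvBStep = pvAStep := funext fun st => funext fun clue => pv_step_eq st clue
  rw [this]
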